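-- pv_equiv track=rewrite | github.com/V1997/ClaimEase | services/form-service/main.py | create_fdf_content
-- ===== SOURCE A (Python) =====
-- from typing import Dict, List, Any
--
-- def create_fdf_content(field_mapping: Dict[str, str]) -> str:
--     """Create FDF content for pdftk with proper escaping"""
--     fdf_header = """%FDF-1.2
-- 1 0 obj
-- <<
-- /FDF
-- <<
-- /Fields [
-- """
--
--     fdf_fields = []
--     for field_name, field_value in field_mapping.items():
--         # Escape special characters in field names and values
--         escaped_field_name = field_name.replace('\\', '\\\\').replace('(', '\\(').replace(')', '\\)')
--         escaped_value = str(field_value).replace('\\', '\\\\').replace('(', '\\(').replace(')', '\\)')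
--         fdf_fields.append(f"<< /T ({escaped_field_name}) /V ({escaped_value}) >>")
--
--     fdf_footer = """]
-- >>
-- >>
-- endobj
-- trailer
--
-- <<
-- /Root 1 0 R
-- >>
-- %%EOF"""
--
--     return fdf_header + '\n'.join(fdf_fields) + '\n' + fdf_footer
-- ===== SOURCE B (Python) =====
-- def create_fdf_content(field_mapping):
--     """Create FDF content for pdftk: stream everything into one character buffer.
--
--     Instead of building escaped strings per field and joining lines, this walks
--     the mapping once, emitting characters (with inline escaping of \\ ( ) )
--     into a single output buffer, and joins that buffer once at the end.
--     """
--     out = list("%FDF-1.2\n1 0 obj\n<<\n/FDF\n<<\n/Fields [\n")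
--     first = True
--     for field_name, field_value in field_mapping.items():
--         if not first:
--             out.append('\n')
--         first = False
--         out.extend("<< /T (")
--         for ch in field_name:
--             if ch in '\\()':
--                 out.append('\\')
--             out.append(ch)
--         out.extend(") /V (")
--         for ch in str(field_value):
--             if ch in '\\()':
--                 out.append('\\')
--             out.append(ch)
--         out.extend(") >>")
--     out.append('\n')
--     out.extend("]\n>>\n>>\nendobj\ntrailer\n\n<<\n/Root 1 0 R\n>>\n%%EOF")
--     return ''.join(out)
-- ===== Notes on version B (the rewrite author's own statement) =====
-- stated objective: alternative
-- what changed: B streams the whole document in a single pass into one flat character buffer (inline per-character escaping, separator newline handled by a first-line flag, one final join), instead of A's staged pipeline of three chained .replace scans per string, a collected list of line strings and a '\n'.join.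
import Mathlib
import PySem

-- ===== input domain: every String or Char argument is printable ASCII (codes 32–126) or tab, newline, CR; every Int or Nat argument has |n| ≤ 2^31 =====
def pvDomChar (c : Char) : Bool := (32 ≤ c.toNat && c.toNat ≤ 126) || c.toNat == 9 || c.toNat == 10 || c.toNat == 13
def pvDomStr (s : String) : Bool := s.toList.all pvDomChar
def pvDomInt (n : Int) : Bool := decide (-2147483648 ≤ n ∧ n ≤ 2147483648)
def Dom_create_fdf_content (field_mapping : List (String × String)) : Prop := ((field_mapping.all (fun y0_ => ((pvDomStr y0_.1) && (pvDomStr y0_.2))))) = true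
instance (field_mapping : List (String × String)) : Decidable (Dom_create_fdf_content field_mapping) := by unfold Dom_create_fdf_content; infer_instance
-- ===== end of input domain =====

-- B streams the whole document into one character buffer in a single pass (inline escaping,
-- separator handled by a first-line flag) instead of A's escape-per-string / collect lines / join (objective: alternative).

-- ===== PORT A =====
-- A: escaped = s.replace('\\','\\\\').replace('(','\\(').replace(')','\\)')
def escapeA (s : String) : String :=
  PySem.Str.replace (PySem.Str.replace (PySem.Str.replace s "\\" "\\\\") "(" "\\(") ")" "\\)"

def create_fdf_content (field_mapping : List (String × String)) : String :=
  let fdf_header := "%FDF-1.2\n1 0 obj\n<<\n/FDF\n<<\n/Fields [\n"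
  let fdf_fields := field_mapping.foldl
    (fun acc p => acc ++ ["<< /T (" ++ escapeA p.1 ++ ") /V (" ++ escapeA p.2 ++ ") >>"]) []
  let fdf_footer := "]\n>>\n>>\nendobj\ntrailer\n\n<<\n/Root 1 0 R\n>>\n%%EOF"
  fdf_header ++ PySem.Str.join "\n" fdf_fields ++ "\n" ++ fdf_footer

-- ===== PORT B =====
-- B: inner char loop 'for ch in s: maybe append backslash; append ch' into the shared buffer
def escInto (s : List Char) (acc : List Char) : List Char :=
  s.foldl (fun a c => if c = '\\' ∨ c = '(' ∨ c = ')' then (a ++ ['\\']) ++ [c] else a ++ [c]) acc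

-- B: one foldl over the mapping carrying (buffer, first) — the Python loop's state
def create_fdf_content_alt (field_mapping : List (String × String)) : String :=
  let step : (List Char × Bool) → (String × String) → (List Char × Bool) := fun st p =>
    let o1 := if st.2 then st.1 else st.1 ++ ['\n']
    let o2 := o1 ++ "<< /T (".toList
    let o3 := escInto p.1.toList o2
    let o4 := o3 ++ ") /V (".toList
    let o5 := escInto p.2.toList o4
    (o5 ++ ") >>".toList, false)
  let st := field_mapping.foldl step ("%FDF-1.2\n1 0 obj\n<<\n/FDF\n<<\n/Fields [\n".toList, true)
  String.ofList ((st.1 ++ ['\n']) ++ "]\n>>\n>>\nendobj\ntrailer\n\n<<\n/Root 1 0 R\n>>\n%%EOF".toList)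

-- ===== PRECONDITION & SPEC =====
def Spec_create_fdf_content (field_mapping : List (String × String)) (out : String) : Prop := out = create_fdf_content_alt field_mapping
instance (field_mapping : List (String × String)) (out : String) : Decidable (Spec_create_fdf_content field_mapping out) := by unfold Spec_create_fdf_content; infer_instance

-- ===== CLAIM (what is proved, stated in full; the proofs are below) =====
def Claim_equal_create_fdf_content : Prop := ∀ (field_mapping : List (String × String)), Dom_create_fdf_content field_mapping → Spec_create_fdf_content field_mapping (create_fdf_content field_mapping)

-- ===== LEMMAS AND PROOFS =====

-- the per-character escape, as a pure function
def escChar (c : Char) : List Char :=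
  if c = '\\' ∨ c = '(' ∨ c = ')' then ['\\', c] else [c]

theorem escInto_eq (s acc : List Char) : escInto s acc = acc ++ s.flatMap escChar := by
  induction s generalizing acc with
  | nil => simp [escInto]
  | cons c t ih =>
    by_cases h : c = '\\' ∨ c = '(' ∨ c = ')'
    · rw [show escInto (c :: t) acc = escInto t ((acc ++ ['\\']) ++ [c]) from by
        simp only [escInto, List.foldl_cons, if_pos h]]
      rw [ih]; simp [escChar, h]
    · rw [show escInto (c :: t) acc = escInto t (acc ++ [c]) from by
        simp only [escInto, List.foldl_cons, if_neg h]]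
      rw [ih]; simp [escChar, h]

-- replace with a single-char pattern is a per-character flatMap
theorem replace_go_single (o : Char) (new : List Char) :
    ∀ (l : List Char) (acc : List Char) (fuel : Nat), l.length ≤ fuel →
      PySem.Chars.replace.go [o] new fuel l acc
        = acc.reverse ++ l.flatMap (fun c => if c = o then new else [c]) := by
  intro l
  induction l with
  | nil =>
    intro acc fuel _
    cases fuel <;> simp [PySem.Chars.replace.go]
  | cons c t ih =>
    intro acc fuel hf
    cases fuel with
    | zero => simp at hf
    | succ fuel =>
      by_cases h : c = o
      · subst h
        simp only [PySem.Chars.replace.go, List.isPrefixOf, beq_self_eq_true, Bool.true_and,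
          if_true]
        rw [show List.drop [c].length (c :: t) = t from rfl]
        rw [ih _ fuel (by simpa using Nat.le_of_succ_le_succ hf)]
        simp
      · simp only [PySem.Chars.replace.go]
        rw [show ([o].isPrefixOf (c :: t)) = false by
          simp [List.isPrefixOf]; exact fun hh => (h hh.symm).elim]
        simp only [Bool.false_eq_true, if_false]
        rw [ih _ fuel (by simpa using Nat.le_of_succ_le_succ hf)]
        simp [h]

theorem replace_single (s : List Char) (o : Char) (new : List Char) :
    PySem.Chars.replace s [o] new = s.flatMap (fun c => if c = o then new else [c]) := by
  rw [PySem.Chars.replace]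
  simp only [List.isEmpty]
  simpa using replace_go_single o new s [] s.length (le_refl _)

theorem escapeA_toList (s : String) : (escapeA s).toList = s.toList.flatMap escChar := by
  unfold escapeA
  simp only [PySem.Str.toList_replace]
  rw [show ("\\" : String).toList = ['\\'] from rfl, show ("(" : String).toList = ['('] from rfl,
     show (")" : String).toList = [')'] from rfl,
     show ("\\\\" : String).toList = ['\\', '\\'] from rfl,
     show ("\\(" : String).toList = ['\\', '('] from rfl,
     show ("\\)" : String).toList = ['\\', ')'] from rfl]
  rw [replace_single, replace_single, replace_single]
  rw [List.flatMap_assoc, List.flatMap_assoc]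
  apply List.flatMap_congr
  intro c _
  by_cases h1 : c = '\\'
  · subst h1; rfl
  · by_cases h2 : c = '('
    · subst h2; rfl
    · by_cases h3 : c = ')'
      · subst h3; rfl
      · simp [escChar, h1, h2, h3]

-- the characters of one field line
def lineC (p : String × String) : List Char :=
  "<< /T (".toList ++ p.1.toList.flatMap escChar ++ ") /V (".toList
    ++ p.2.toList.flatMap escChar ++ ") >>".toList

theorem lineA_toList (p : String × String) :
    ("<< /T (" ++ escapeA p.1 ++ ") /V (" ++ escapeA p.2 ++ ") >>").toList = lineC p := by
  simp [String.toList_append, escapeA_toList, lineC]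

theorem foldl_append_map {α β : Type} (f : α → β) :
    ∀ (l : List α) (acc : List β),
      l.foldl (fun acc x => acc ++ [f x]) acc = acc ++ l.map f := by
  intro l
  induction l with
  | nil => simp
  | cons x t ih => intro acc; simp [List.foldl, ih]

-- B's step function, named so the fold lemmas can talk about it
def stepB (st : List Char × Bool) (p : String × String) : List Char × Bool :=
  (escInto p.2.toList (escInto p.1.toList (
      (if st.2 then st.1 else st.1 ++ ['\n']) ++ "<< /T (".toList) ++ ") /V (".toList)
    ++ ") >>".toList, false)

theorem stepB_eq (st : List Char × Bool) (p : String × String) :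
    stepB st p = ((if st.2 then st.1 else st.1 ++ ['\n']) ++ lineC p, false) := by
  simp [stepB, escInto_eq, lineC]

theorem foldl_stepB_false :
    ∀ (l : List (String × String)) (acc : List Char),
      (l.foldl stepB (acc, false)).1 = acc ++ l.flatMap (fun p => '\n' :: lineC p) := by
  intro l
  induction l with
  | nil => simp
  | cons p t ih =>
    intro acc
    simp only [List.foldl_cons, stepB_eq, if_neg (by simp : ¬ (false = true))]
    rw [ih]
    simp

theorem foldl_stepB_true (l : List (String × String)) (acc : List Char) :
    (l.foldl stepB (acc, true)).1
      = acc ++ PySem.Chars.join ['\n'] (l.map lineC) := by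
  cases l with
  | nil => simp [PySem.Chars.join_nil]
  | cons p t =>
    simp only [List.foldl_cons, stepB_eq]
    rw [foldl_stepB_false]
    have hjoin : ∀ (t : List (String × String)) (p : String × String),
        PySem.Chars.join ['\n'] ((p :: t).map lineC)
          = lineC p ++ t.flatMap (fun q => '\n' :: lineC q) := by
      intro t
      induction t with
      | nil => intro p; simp [PySem.Chars.join_singleton]
      | cons q r ih =>
        intro p
        simp only [List.map_cons] at *
        rw [PySem.Chars.join_cons_cons, ih]
        simp
    rw [hjoin]
    simp

-- ===== VERDICT (by name: the statement is the Claim_ definition above) =====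
theorem create_fdf_content_spec : Claim_equal_create_fdf_content := by
  intro fm _
  unfold Spec_create_fdf_content create_fdf_content create_fdf_content_alt
  rw [foldl_append_map]
  have hstep : (fun (st : List Char × Bool) (p : String × String) =>
      (escInto p.2.toList (escInto p.1.toList (
          (if st.2 then st.1 else st.1 ++ ['\n']) ++ "<< /T (".toList) ++ ") /V (".toList)
        ++ ") >>".toList, false)) = stepB := rfl
  simp only [List.nil_append]
  rw [hstep, ← String.ofList_toList
        (s := "%FDF-1.2\n1 0 obj\n<<\n/FDF\n<<\n/Fields [\n"
          ++ PySem.Str.join "\n" (fm.map (fun p => "<< /T (" ++ escapeA p.1 ++ ") /V (" ++ escapeA p.2 ++ ") >>")) ++ "\n"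
          ++ "]\n>>\n>>\nendobj\ntrailer\n\n<<\n/Root 1 0 R\n>>\n%%EOF")]
  rw [foldl_stepB_true]
  congr 1
  simp only [String.toList_append, PySem.Str.toList_join, List.map_map]
  have hmap : (fm.map (fun p => "<< /T (" ++ escapeA p.1 ++ ") /V (" ++ escapeA p.2 ++ ") >>")).map String.toList
      = fm.map lineC := by
    simp only [List.map_map]
    exact List.map_congr_left (fun p _ => lineA_toList p)
  rw [show ("\n" : String).toList = ['\n'] from rfl]
  simp only [List.map_map] at hmap ⊢
  rw [hmap]
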